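-- pv_equiv track=rewrite | github.com/yordan-marinov/fundamentals_python | mid_exams/bomb_numbers.py | detonation_bomb
-- ===== SOURCE A (Python) =====
-- def detonation_bomb(data):
--     lst = data[0]
--     bomb = int(data[1][0])
--     power = int(data[1][1])
--
--     while bomb in lst:
--         bomb_index = lst.index(int(data[1][0]))
--
--         start = bomb_index - power
--         if start < 0:
--             start = 0
--
--         end = bomb_index + power
--         if end > len(lst):
--             end = len(lst) - 1
--
--         del lst[start:end + 1]
--
--     return sum(lst)
-- ===== SOURCE B (Python) =====
-- def detonation_bomb(data):
--     bomb = int(data[1][0])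
--     power = int(data[1][1])
--     stack = []
--     skip = 0
--     for x in data[0]:
--         if skip > 0:
--             skip -= 1
--         elif x == bomb:
--             del stack[max(len(stack) - power, 0):]
--             skip = power
--         else:
--             stack.append(x)
--     return sum(stack)
-- ===== Notes on version B (the rewrite author's own statement) =====
-- stated objective: alternative
-- what changed: Replaced the restart-and-rescan while loop (membership test + list.index + slice deletion per detonation) by a single left-to-right pass keeping a stack of survivors: a bomb pops up to `power` elements from the stack and skips the next `power` elements.
import Mathlib
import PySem

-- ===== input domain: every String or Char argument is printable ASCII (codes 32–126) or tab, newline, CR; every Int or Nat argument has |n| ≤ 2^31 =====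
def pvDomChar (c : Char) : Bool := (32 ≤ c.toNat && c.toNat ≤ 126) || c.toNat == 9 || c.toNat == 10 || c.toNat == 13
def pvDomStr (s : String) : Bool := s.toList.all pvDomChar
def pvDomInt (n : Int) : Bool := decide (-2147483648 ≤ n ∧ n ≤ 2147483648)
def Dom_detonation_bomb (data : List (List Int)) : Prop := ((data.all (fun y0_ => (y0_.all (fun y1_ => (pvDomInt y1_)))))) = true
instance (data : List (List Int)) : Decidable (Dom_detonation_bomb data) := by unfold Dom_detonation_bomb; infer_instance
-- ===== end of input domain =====

-- B replaces A's restart-and-rescan while loop by a single left-to-right stack pass.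
-- A mutates data[0] in place (del slices), B does not: the equivalence proved is about the return value only.

-- ===== PORT A =====
-- Fuel (initial length + 1) is a totality guard only: under Pre_ every iteration deletes at
-- least the bomb element, so the fuel is never exhausted.
-- `start = bomb_index - power; if start < 0: start = 0`
def pvStartA (bombIndex power : Int) : Int :=
  if bombIndex - power < 0 then 0 else bombIndex - power

-- `end = bomb_index + power; if end > len(lst): end = len(lst) - 1`
def pvStopA (bombIndex power len : Int) : Int :=
  if bombIndex + power > len then len - 1 else bombIndex + power

def pvLoopA (bomb power : Int) : Nat → List Int → Int
  | 0, lst => lst.sum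
  | fuel+1, lst =>
    if bomb ∈ lst then
      -- `del lst[start:end + 1]` leaves lst[:start] ++ lst[end+1:]
      pvLoopA bomb power fuel
        (PySem.List.slice lst none
            (some (pvStartA (((PySem.List.index? lst bomb).getD 0 : Nat) : Int) power)) ++
         PySem.List.slice lst
            (some (pvStopA (((PySem.List.index? lst bomb).getD 0 : Nat) : Int) power (lst.length : Int) + 1)) none)
    else lst.sum

def detonation_bomb (data : List (List Int)) : Int :=
  let lst := (PySem.List.pyGet? data 0).getD []
  let params := (PySem.List.pyGet? data 1).getD []
  let bomb := (PySem.List.pyGet? params 0).getD 0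
  let power := (PySem.List.pyGet? params 1).getD 0
  pvLoopA bomb power (lst.length + 1) lst

-- ===== PORT B =====
def pvStepB (bomb power : Int) (st : List Int × Int) (x : Int) : List Int × Int :=
  if st.2 > 0 then (st.1, st.2 - 1)
  else if x = bomb then (st.1.take ((st.1.length : Int) - power).toNat, power)
  else (st.1 ++ [x], 0)

def detonation_bomb_alt (data : List (List Int)) : Int :=
  let params := (PySem.List.pyGet? data 1).getD []
  let bomb := (PySem.List.pyGet? params 0).getD 0
  let power := (PySem.List.pyGet? params 1).getD 0
  (((PySem.List.pyGet? data 0).getD []).foldl (pvStepB bomb power) ([], 0)).1.sum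

-- ===== PRECONDITION & SPEC =====
-- Pre_ excludes exactly the inputs on which A does not return: fewer than 2 rows or fewer than
-- 2 parameters (IndexError), and a negative power with the bomb present in the list (A's del of
-- an empty slice then removes nothing and the while loop never terminates).
def Pre_detonation_bomb (data : List (List Int)) : Prop :=
  2 ≤ data.length ∧ 2 ≤ (data.getD 1 []).length ∧
  (0 ≤ (data.getD 1 []).getD 1 0 ∨ (data.getD 1 []).getD 0 0 ∉ data.getD 0 [])
instance (data : List (List Int)) : Decidable (Pre_detonation_bomb data) := by
  unfold Pre_detonation_bomb; infer_instance

def pvWitness_detonation_bomb : List (List Int) := [[1, 2, 1, 4], [2, 1]]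

def Spec_detonation_bomb (data : List (List Int)) (out : Int) : Prop := out = detonation_bomb_alt data
instance (data : List (List Int)) (out : Int) : Decidable (Spec_detonation_bomb data out) := by unfold Spec_detonation_bomb; infer_instance

-- ===== CLAIM (what is proved, stated in full; the proofs are below) =====
def Claim_equal_detonation_bomb : Prop := ∀ (data : List (List Int)), Dom_detonation_bomb data → Pre_detonation_bomb data → Spec_detonation_bomb data (detonation_bomb data)

-- ===== LEMMAS AND PROOFS =====

-- folding B's step over a bomb-free list with no pending skip appends the list to the stack
theorem pvFold_no_bomb (bomb power : Int) (l : List Int) (st : List Int)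
    (h : bomb ∉ l) : l.foldl (pvStepB bomb power) (st, 0) = (st ++ l, 0) := by
  induction l generalizing st with
  | nil => simp
  | cons x l ih =>
    simp only [List.mem_cons, not_or] at h
    rw [List.foldl_cons]
    have hx : ¬ (x = bomb) := fun hxx => h.1 hxx.symm
    have hstep : pvStepB bomb power (st, 0) x = (st ++ [x], 0) := by
      simp [pvStepB, hx]
    rw [hstep, ih (st ++ [x]) h.2, List.append_assoc]
    rfl

-- a pending skip of k ≥ 0 drops the next k elements and leaves the stack unchanged
theorem pvFold_skip (bomb power : Int) (l : List Int) (st : List Int) (k : Int) (hk : 0 ≤ k) :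
    (l.foldl (pvStepB bomb power) (st, k)).1
      = ((l.drop k.toNat).foldl (pvStepB bomb power) (st, 0)).1 := by
  induction l generalizing k with
  | nil => simp
  | cons x l ih =>
    rcases eq_or_lt_of_le hk with h0 | h0
    · rw [← h0]; rfl
    · have hstep : pvStepB bomb power (st, k) x = (st, k - 1) := by
        simp [pvStepB, h0]
      have hdrop : (x :: l).drop k.toNat = l.drop (k - 1).toNat := by
        have hk1 : k.toNat = (k - 1).toNat + 1 := by omega
        rw [hk1, List.drop_succ_cons]
      rw [List.foldl_cons, hstep, hdrop, ih (k - 1) (by omega)]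

-- first occurrence index of the bomb
theorem pvIndexFirst (bomb : Int) (pre rest : List Int) (h : bomb ∉ pre) :
    PySem.List.index? (pre ++ bomb :: rest) bomb = some pre.length := by
  induction pre with
  | nil => simpa using PySem.List.index?_cons_self bomb rest
  | cons x pre ih =>
    simp only [List.mem_cons, not_or] at h
    rw [List.cons_append, PySem.List.index?_eq_idxOf?, List.idxOf?_cons,
        if_neg (by simp [Ne.symm h.1]), ← PySem.List.index?_eq_idxOf?, ih h.2]
    simp

-- split a list at the first occurrence of the bomb
theorem pvSplitFirst (bomb : Int) (l : List Int) (h : bomb ∈ l) :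
    ∃ s t, l = s ++ bomb :: t ∧ bomb ∉ s := by
  induction l with
  | nil => cases h
  | cons x l ih =>
    by_cases hx : x = bomb
    · exact ⟨[], l, by simp [hx], by simp⟩
    · have h' : bomb ∈ l := by
        rcases List.mem_cons.mp h with h1 | h1
        · exact absurd h1.symm hx
        · exact h1
      rcases ih h' with ⟨s, t, rfl, hs⟩
      exact ⟨x :: s, t, rfl, by
        simp only [List.mem_cons, not_or]
        exact ⟨fun hbe => hx hbe.symm, hs⟩⟩

-- the core equivalence: A's restart loop equals B's single pass on any list
theorem pvMain (bomb power : Int) (fuel : Nat) : ∀ lst : List Int, lst.length < fuel →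
    (0 ≤ power ∨ bomb ∉ lst) →
    pvLoopA bomb power fuel lst = ((lst.foldl (pvStepB bomb power) ([], 0)).1).sum := by
  induction fuel with
  | zero => intro lst h _; omega
  | succ fuel ih =>
    intro lst hlen hpre
    by_cases hb : bomb ∈ lst
    · have hp : 0 ≤ power := hpre.resolve_right (fun h => h hb)
      obtain ⟨pre, rest, rfl, hnb⟩ := pvSplitFirst bomb lst hb
      set lst := pre ++ bomb :: rest with hlst
      -- A's one step
      have hidx : PySem.List.index? lst bomb = some pre.length := pvIndexFirst bomb pre rest hnb
      have hA : pvLoopA bomb power (fuel+1) lst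
          = pvLoopA bomb power fuel
              (pre.take (pre.length - power.toNat) ++ rest.drop power.toNat) := by
        rw [pvLoopA]
        rw [if_pos hb, hidx]
        simp only [Option.getD_some]
        have hstart : (PySem.List.slice lst none
            (some (pvStartA (pre.length : Int) power)))
            = pre.take (pre.length - power.toNat) := by
          unfold pvStartA
          by_cases hc : (pre.length : Int) - power < 0
          · rw [if_pos hc, PySem.List.slice_to lst (by omega)]
            have h1 : (0 : Int).toNat = 0 := rfl
            have h2 : pre.length - power.toNat = 0 := by omega
            simp [h1, h2]
          · rw [if_neg hc, PySem.List.slice_to lst (by omega)]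
            have h2 : ((pre.length : Int) - power).toNat ≤ pre.length := by omega
            rw [hlst, List.take_append]
            have h3 : ((pre.length : Int) - power).toNat - pre.length = 0 := by omega
            have h4 : ((pre.length : Int) - power).toNat = pre.length - power.toNat := by omega
            simp [h4]
        have hstop : (PySem.List.slice lst
            (some (pvStopA (pre.length : Int) power (lst.length : Int) + 1)) none)
            = rest.drop power.toNat := by
          unfold pvStopA
          have hlenlst : lst.length = pre.length + 1 + rest.length := by simp [hlst]; omega
          by_cases hc : (pre.length : Int) + power > (lst.length : Int)
          · rw [if_pos hc, PySem.List.slice_from lst (by omega)]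
            have h1 : ((lst.length : Int) - 1 + 1).toNat = lst.length := by omega
            have h2 : rest.length ≤ power.toNat := by omega
            simp [List.drop_eq_nil_of_le, h2]
          · rw [if_neg hc, PySem.List.slice_from lst (by omega)]
            have h1 : ((pre.length : Int) + power + 1).toNat
                = pre.length + (power.toNat + 1) := by omega
            rw [h1, hlst, List.drop_append]
            have h2 : pre.length + (power.toNat + 1) - pre.length = power.toNat + 1 := by omega
            have h3 : pre.drop (pre.length + (power.toNat + 1)) = [] :=
              List.drop_eq_nil_of_le (by omega)
            simp [h2, h3]
        rw [hstart, hstop]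
      -- the new list is shorter
      have hshort : (pre.take (pre.length - power.toNat) ++ rest.drop power.toNat).length
          < lst.length := by
        have hlenlst : lst.length = pre.length + 1 + rest.length := by simp [hlst]; omega
        simp only [List.length_append, List.length_take, List.length_drop]
        omega
      -- B takes the same step
      have hB : (lst.foldl (pvStepB bomb power) ([], 0)).1
          = ((pre.take (pre.length - power.toNat) ++ rest.drop power.toNat).foldl
              (pvStepB bomb power) ([], 0)).1 := by
        have hnb' : bomb ∉ pre.take (pre.length - power.toNat) :=
          fun hmem => hnb (List.take_subset _ _ hmem)
        rw [hlst, List.foldl_append, pvFold_no_bomb bomb power pre [] hnb]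
        rw [List.foldl_cons]
        have hstep : pvStepB bomb power (([] ++ pre : List Int), 0) bomb
            = (pre.take (pre.length - power.toNat), power) := by
          have h4 : (((pre.length : Int)) - power).toNat = pre.length - power.toNat := by omega
          simp [pvStepB, h4]
        rw [hstep, pvFold_skip bomb power rest _ power hp,
            List.foldl_append, pvFold_no_bomb bomb power _ [] hnb']
        simp
      rw [hA, ih _ (by omega) (Or.inl hp), hB]
    · rw [pvLoopA, if_neg hb, pvFold_no_bomb bomb power lst [] hb]
      simp

-- ===== VERDICT (by name: the statement is the Claim_ definition above) =====
theorem detonation_bomb_spec : Claim_equal_detonation_bomb := by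
  intro data _ hpre
  obtain ⟨h2, h2', hp⟩ := hpre
  match data with
  | l0 :: l1 :: ds =>
    match l1, h2' with
    | b :: p :: ps, _ =>
      show detonation_bomb _ = detonation_bomb_alt _
      simp only [detonation_bomb, detonation_bomb_alt]
      have hg0 : PySem.List.pyGet? (l0 :: (b :: p :: ps) :: ds) (0 : Int) = some l0 := by
        simp [pysem]
      have hg1 : PySem.List.pyGet? (l0 :: (b :: p :: ps) :: ds) (1 : Int) = some (b :: p :: ps) := by
        simp [pysem]
      rw [hg0, hg1]
      simp only [Option.getD_some]
      have hgb : PySem.List.pyGet? (b :: p :: ps) (0 : Int) = some b := by simp [pysem]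
      have hgp : PySem.List.pyGet? (b :: p :: ps) (1 : Int) = some p := by simp [pysem]
      rw [hgb, hgp]
      simp only [Option.getD_some]
      apply pvMain b p (l0.length + 1) l0 (by omega)
      simpa using hp
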